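/-
  INTERFACE CHECK (compile-only) for the clauses `Args.len_above`, `Args.left_above` of vorbis_decode_packet_rest's precondition
  (Vorbis/Spec/PacketRest.lean; freeze-7, farm report CONTRACT-PRE of the unit vorbis_decode_packet_rest.9): THE ONLY CALLER,
  vorbis_decode_packet (0x113660; the call at 0x113740), ESTABLISHES THEM FROM ITS OWN PRECONDITION. Nothing here is used by a unit.

  The geometry of the call site (c/vorbis_f.dis 0x113660 – 0x113749), with `Rc` the caller's entry rsp:

      0x113660 … 0x11366a   six pushes, `sub rsp, 0x78`               the caller's steady rsp is  Rc − 168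
      0x11367c              `lea rbx, [rsp + 0x10]`                   its protected frame: base = Rc − 152, 96 bytes (`Vorbis.Frames.vorbis_decode_packet`)
      0x113671              `mov [rsp + 8], rsi`                      `len` spilled; reloaded into rsi at 0x113738 (`[rsp + 0x18]` after the two pushes)
      0x113676              `mov rbp, rdx`                            `p_left` kept in rbp (callee-saved over vorbis_decode_initial)
      0x11372f, 0x113730    `push rbp`, `push r15`                    the stack arguments: `p_left` at Rc − 176, `right_end` at Rc − 184
      0x113740              `call vorbis_decode_packet_rest`          the callee's entry rsp is  R = Rc − 192:  [R + 8] = right_end, [R + 16] = p_left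

  So `R + 24 = Rc − 168` is the caller's steady rsp. `len` and `p_left` are the CALLER'S OWN ARGUMENTS (`rsi`, `rdx` at its entry):
  `StackObj`s of ITS callers' frames (`vorbis_decode_packet.spec`'s precondition), hence at or above `Rc + 8` (`LiveIn.above` with the
  caller's `ShadowPre`, whose clean stack ends at `Rc + 8`). `Rc − 168 ≤ Rc + 8 ≤ len, p_left`: one `omega`.

      above_of_caller        the two new clauses (and `R + 24 ≤ 800000H`) from the caller's precondition and the three facts the walker has at the call
      args_at_call           all of `Args` at the call site, for the frame list with the caller's own frame in front: the clauses that
                             existed before are hypotheses (they come from vorbis_decode_initial's post `Top.DecodedMode`), the two new ones are derived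
-/
import Vorbis.Spec.PacketRest
import Vorbis.Spec.Top
import Vorbis.Frames
namespace Vorbis.Spec.PacketRestArgsTest
open X86 X86.User Asan Vorbis Vorbis.Spec Vorbis.Spec.vorbis_decode_packet_rest

variable {others : List Obj} {frames : List (Nat × FrameLayout)}

/-- **A stack object of the callers' frames lies at or above the end of the clean stack** (`Rc + 8` for a function entered at
`Rc`): `LiveIn.above` leaves "below 700000H" and "at or above 800000H", which `StackObj` excludes. -/
theorem stackObj_above {c : State} (hsh : ShadowPre others frames c) {p : Nat} (hp : StackObj others frames p 4) :
    (c.reg .rsp).toNat + 8 ≤ p := by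
  obtain ⟨hlive, hlo, hhi⟩ := hp
  have habove := hlive.above hsh.inv
  omega

/-- **The two new clauses at the call site** (and `Args.args_top`, for the record). `c` is the caller's entry state (`hroom`: its
`AtEntry.room` with its frame size 4048; `hsh`, `hlen`, `hleft`: clauses of `vorbis_decode_packet.spec`'s precondition), `s` the
callee's entry state: `hrsp` — six pushes, `sub rsp, 0x78`, two pushes, the return address: 192 bytes —, `hsi` — rsi reloaded from
the spill slot —, `hpl` — the qword pushed from rbp. -/
theorem above_of_caller {c s : State} (hroom : 0x700000 + 4048 ≤ (c.reg .rsp).toNat)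
    (hsh : ShadowPre others frames c)
    (hlen : StackObj others frames (c.reg .rsi).toNat 4) (hleft : StackObj others frames (c.reg .rdx).toNat 4)
    (hrsp : (s.reg .rsp).toNat = (c.reg .rsp).toNat - 192)
    (hsi : lenOf s = (c.reg .rsi).toNat) (hpl : pLeftOf s = (c.reg .rdx).toNat) :
    (s.reg .rsp).toNat + 24 ≤ lenOf s ∧ (s.reg .rsp).toNat + 24 ≤ pLeftOf s ∧ (s.reg .rsp).toNat + 24 ≤ 0x800000 := by
  have h1 := stackObj_above hsh hlen
  have h2 := stackObj_above hsh hleft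
  have h3 := hleft.2.2
  rw [hsi, hpl]
  omega

/-- A stack object of the callers' frames is one of the frame list with the caller's own frame in front (the list of the callee's
precondition). -/
theorem stackObj_push {p n : Nat} (hp : StackObj others frames p n) (base : Nat) (F : FrameLayout) :
    StackObj others ((base, F) :: frames) p n := by
  obtain ⟨hlive, hlo, hhi⟩ := hp
  refine ⟨hlive.mono ?_, hlo, hhi⟩
  intro o ho
  rw [stackObjs_cons, List.append_assoc]
  exact List.mem_append_right _ ho

/-- **`Args` at the call site in vorbis_decode_packet**, for the frame list `(Rc − 152, Frames.vorbis_decode_packet) :: frames`.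
The clauses `mode_lt`, `m_eq`, `w2`, `left_val`, `apart` are hypotheses here (the first four are vorbis_decode_initial's post
`Top.DecodedMode` carried to the call; `apart` is the caller's `Top.Apart4`); `len_obj`, `left_obj` are the caller's own `StackObj`s
under one more frame; `len_above`, `left_above` are `above_of_caller`. -/
example {c s : State} (mode : Nat) (hroom : 0x700000 + 4048 ≤ (c.reg .rsp).toNat)
    (hsh : ShadowPre others frames c)
    (hlen : StackObj others frames (c.reg .rsi).toNat 4) (hleft : StackObj others frames (c.reg .rdx).toNat 4)
    (hrsp : (s.reg .rsp).toNat = (c.reg .rsp).toNat - 192)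
    (hsi : lenOf s = (c.reg .rsi).toNat) (hpl : pLeftOf s = (c.reg .rdx).toNat)
    (hmode : (mode : Int) < stb_vorbis.mode_count s.mem (fOf s))
    (hm : mOf s = stb_vorbis.mode_config_at (fOf s) mode)
    (hw2 : ∃ le : Int, W2 (stb_vorbis.blocksize_0 s.mem (fOf s)) (stb_vorbis.blocksize_1 s.mem (fOf s))
      (nIntOf s.mem (fOf s) (mOf s)) (lsOf s) le (rsOf s) (reOf s))
    (hval : s.mem.i32 (pLeftOf s) = lsOf s)
    (hapart : lenOf s + 4 ≤ pLeftOf s ∨ pLeftOf s + 4 ≤ lenOf s) :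
    Args others (((c.reg .rsp).toNat - 152, Vorbis.Frames.vorbis_decode_packet) :: frames) mode s := by
  obtain ⟨k1, k2, _⟩ := above_of_caller hroom hsh hlen hleft hrsp hsi hpl
  have olen : StackObj others (((c.reg .rsp).toNat - 152, Vorbis.Frames.vorbis_decode_packet) :: frames) (lenOf s) 4 := by
    rw [hsi]
    exact stackObj_push hlen _ _
  have oleft : StackObj others (((c.reg .rsp).toNat - 152, Vorbis.Frames.vorbis_decode_packet) :: frames) (pLeftOf s) 4 := by
    rw [hpl]
    exact stackObj_push hleft _ _
  exact ⟨hmode, hm, hw2, hval, olen, oleft, hapart, k1, k2⟩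

/-- **The counter-state of the farm report is excluded**: entry rsp = 7FFFF0H with `p_left = 7FFFF8H` (the slot of `right_end`
itself; the qword argument `p_left` at `[800000H, 800008H)` in arena memory) satisfied every clause of the OLD precondition; it
contradicts `left_above`. -/
example {mode : Nat} {u : State} (h : Args others frames mode u) (hrsp : (u.reg .rsp).toNat = 0x7FFFF0) :
    pLeftOf u ≠ 0x7FFFF8 := by
  have h1 := h.left_above
  omega

end Vorbis.Spec.PacketRestArgsTest
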